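-- pv_equiv track=rewrite | github.com/jaivardhan1209/Natural_Language_processing | Lesk_Algorithm/Lesk.py | findOverlapWithSentence
-- ===== SOURCE A (Python) =====
-- def findOverlapWithSentence(synset_gloss_example, sentence):
--     overlap = []
--     for word in sentence:
--         for item in synset_gloss_example:
--             for corpousWord in item:
--                 if corpousWord.lower() == word.lower():
--                     overlap.append(corpousWord)
--     return set(overlap)
-- ===== SOURCE B (Python) =====
-- def findOverlapWithSentence(synset_gloss_example, sentence):
--     # Build a lowercase index of the corpus once, then one pass over the sentence.
--     index = {}
--     for item in synset_gloss_example: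
--         for corpousWord in item:
--             index.setdefault(corpousWord.lower(), []).append(corpousWord)
--     overlap = []
--     for word in sentence:
--         overlap.extend(index.get(word.lower(), []))
--     return set(overlap)
-- ===== Notes on version B (the rewrite author's own statement) =====
-- stated objective: faster
-- what changed: B builds a dict index from lowercased corpus word to its occurrences in one pass over the corpus, then looks each sentence word up once, instead of rescanning the whole corpus for every sentence word.
import Mathlib
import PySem

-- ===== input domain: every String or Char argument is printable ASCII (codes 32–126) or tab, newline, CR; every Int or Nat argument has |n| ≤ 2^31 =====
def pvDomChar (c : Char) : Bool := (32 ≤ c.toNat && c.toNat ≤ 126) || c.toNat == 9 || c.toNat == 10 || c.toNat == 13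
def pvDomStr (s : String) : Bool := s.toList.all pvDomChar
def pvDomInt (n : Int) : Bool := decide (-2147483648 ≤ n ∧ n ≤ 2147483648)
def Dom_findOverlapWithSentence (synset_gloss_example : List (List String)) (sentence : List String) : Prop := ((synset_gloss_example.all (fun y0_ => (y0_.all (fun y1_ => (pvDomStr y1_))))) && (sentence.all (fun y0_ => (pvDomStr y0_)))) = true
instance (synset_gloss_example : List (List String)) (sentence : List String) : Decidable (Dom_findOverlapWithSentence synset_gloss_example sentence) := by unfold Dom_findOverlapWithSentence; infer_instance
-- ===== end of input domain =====

-- B replaces A's rescan of the whole corpus for every sentence word by a dict index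
-- (lowercased corpus word -> its occurrences) built once, then one lookup per sentence word.

-- ===== PORT A =====
def findOverlapWithSentence (synset_gloss_example : List (List String)) (sentence : List String) : List String :=
  PySem.Set.ofList
    (sentence.foldl (fun overlap word =>
      synset_gloss_example.foldl (fun overlap item =>
        item.foldl (fun overlap corpousWord =>
          if PySem.Str.lower corpousWord == PySem.Str.lower word then overlap ++ [corpousWord]
          else overlap) overlap) overlap) [])

-- ===== PORT B =====
-- index.setdefault(corpousWord.lower(), []).append(corpousWord)  =  modify key [] (· ++ [corpousWord])
def pvBuildIndex (synset_gloss_example : List (List String)) : PySem.Dict String (List String) :=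
  synset_gloss_example.foldl (fun index item =>
    item.foldl (fun index corpousWord =>
      index.modify (PySem.Str.lower corpousWord) [] (· ++ [corpousWord])) index) PySem.Dict.empty

def findOverlapWithSentence_alt (synset_gloss_example : List (List String)) (sentence : List String) : List String :=
  let index := pvBuildIndex synset_gloss_example
  PySem.Set.ofList
    (sentence.foldl (fun overlap word => overlap ++ index.getD (PySem.Str.lower word) []) [])

-- ===== PRECONDITION & SPEC =====
def Spec_findOverlapWithSentence (synset_gloss_example : List (List String)) (sentence : List String) (out : List String) : Prop := out = findOverlapWithSentence_alt synset_gloss_example sentence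
instance (synset_gloss_example : List (List String)) (sentence : List String) (out : List String) : Decidable (Spec_findOverlapWithSentence synset_gloss_example sentence out) := by unfold Spec_findOverlapWithSentence; infer_instance

-- ===== CLAIM (what is proved, stated in full; the proofs are below) =====
def Claim_equal_findOverlapWithSentence : Prop := ∀ (synset_gloss_example : List (List String)) (sentence : List String), Dom_findOverlapWithSentence synset_gloss_example sentence → Spec_findOverlapWithSentence synset_gloss_example sentence (findOverlapWithSentence synset_gloss_example sentence)

-- ===== LEMMAS AND PROOFS =====

-- the dict index returns, for key c, exactly the corpus words whose lowercase is c, in corpus order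
theorem pvIndexLoop_getD (l : List String) (d : PySem.Dict String (List String)) (c : String) :
    (l.foldl (fun d w => d.modify (PySem.Str.lower w) [] (· ++ [w])) d).getD c [] =
      d.getD c [] ++ l.filter (fun w => PySem.Str.lower w == c) := by
  induction l generalizing d with
  | nil => simp
  | cons w l ih =>
    simp only [List.foldl_cons, List.filter_cons, ih, PySem.Dict.getD_modify]
    by_cases h : c = PySem.Str.lower w
    · simp [h]
    · simp [h, beq_iff_eq, Ne.symm h]

theorem pvBuildIndex_getD (g : List (List String)) (c : String) :
    (pvBuildIndex g).getD c [] =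
      g.flatten.filter (fun w => PySem.Str.lower w == c) := by
  unfold pvBuildIndex
  rw [← List.foldl_flatten, pvIndexLoop_getD]
  simp

-- A's inner double loop over the corpus appends exactly those matches
theorem pvInner (g : List (List String)) (word : String) (acc : List String) :
    g.foldl (fun overlap item =>
      item.foldl (fun overlap corpousWord =>
        if PySem.Str.lower corpousWord == PySem.Str.lower word then overlap ++ [corpousWord]
        else overlap) overlap) acc =
    acc ++ g.flatten.filter (fun w => PySem.Str.lower w == PySem.Str.lower word) := by
  rw [← List.foldl_flatten]
  exact PySem.List.foldl_append_if_eq_filter _ _ _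

-- ===== VERDICT (by name: the statement is the Claim_ definition above) =====
theorem findOverlapWithSentence_spec : Claim_equal_findOverlapWithSentence := by
  intro g s _
  unfold Spec_findOverlapWithSentence findOverlapWithSentence findOverlapWithSentence_alt
  congr 1
  apply PySem.List.foldl_congr_mem
  intro acc word _
  rw [pvInner, pvBuildIndex_getD]
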